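-- pv_equiv track=rewrite | github.com/faraplay/zundamahjong | src/mahjong/tile.py | get_tile_value_buckets
-- ===== SOURCE A (Python) =====
-- TileId = int
--
-- TileValue = int
--
-- N = 10
--
-- def get_tile_value(tile: TileId) -> TileValue:
--     return tile // N
--
-- def get_tile_value_buckets(tiles: list[TileId]) -> dict[int, list[int]]:
--     tile_value_buckets: dict[TileValue, list[TileId]] = {}
--     for tile in tiles:
--         tile_value = get_tile_value(tile)
--         bucket = tile_value_buckets.get(tile_value)
--         if bucket is None:
--             bucket = []
--             tile_value_buckets[tile_value] = bucket
--         bucket.append(tile)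
--     return tile_value_buckets
-- ===== SOURCE B (Python) =====
-- def get_tile_value_buckets(tiles):
--     order = list(dict.fromkeys(tile // 10 for tile in tiles))
--     return {value: [tile for tile in tiles if tile // 10 == value]
--             for value in order}
-- ===== Notes on version B (the rewrite author's own statement) =====
-- stated objective: idiomatic
-- what changed: Replaces incremental dict-bucketing (get, lazily create, append) with a two-pass comprehension: dedupe the tile values in first-appearance order, then build {value: filtered tiles} in one dict comprehension.
import Mathlib
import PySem

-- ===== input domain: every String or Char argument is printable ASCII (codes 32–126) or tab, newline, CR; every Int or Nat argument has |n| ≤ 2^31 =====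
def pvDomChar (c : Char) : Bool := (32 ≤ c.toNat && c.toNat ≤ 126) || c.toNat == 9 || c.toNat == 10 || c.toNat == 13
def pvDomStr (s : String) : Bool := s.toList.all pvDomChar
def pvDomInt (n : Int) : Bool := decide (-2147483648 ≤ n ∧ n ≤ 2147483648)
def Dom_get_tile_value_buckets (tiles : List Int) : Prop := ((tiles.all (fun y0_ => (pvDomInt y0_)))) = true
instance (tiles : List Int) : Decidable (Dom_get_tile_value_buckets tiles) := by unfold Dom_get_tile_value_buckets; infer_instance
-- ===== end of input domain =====

-- B replaces A's incremental dict-bucketing loop with dedupe-then-filter comprehensions (idiomatic, no speed claim).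

-- ===== PORT A =====
def get_tile_value (tile : Int) : Int := PySem.Int.floordiv tile 10

-- the loop body 'bucket = d.get(v); if None: d[v] = []; bucket.append(tile)' is d[v] = d.get(v, []) + [tile] = Dict.modify
def get_tile_value_buckets (tiles : List Int) : List (Int × List Int) :=
  (tiles.foldl (fun d tile => d.modify (get_tile_value tile) [] (· ++ [tile])) PySem.Dict.empty).items

-- ===== PORT B =====
def get_tile_value_buckets_alt (tiles : List Int) : List (Int × List Int) :=
  let order := PySem.List.dedup (tiles.map (fun tile => PySem.Int.floordiv tile 10))
  order.map (fun value => (value, tiles.filter (fun tile => PySem.Int.floordiv tile 10 == value)))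

-- ===== PRECONDITION & SPEC =====
def Spec_get_tile_value_buckets (tiles : List Int) (out : List (Int × List Int)) : Prop := out = get_tile_value_buckets_alt tiles
instance (tiles : List Int) (out : List (Int × List Int)) : Decidable (Spec_get_tile_value_buckets tiles out) := by unfold Spec_get_tile_value_buckets; infer_instance

-- ===== CLAIM (what is proved, stated in full; the proofs are below) =====
def Claim_equal_get_tile_value_buckets : Prop := ∀ (tiles : List Int), Dom_get_tile_value_buckets tiles → Spec_get_tile_value_buckets tiles (get_tile_value_buckets tiles)

-- ===== LEMMAS AND PROOFS =====

theorem buckets_eq (tiles : List Int) :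
    get_tile_value_buckets tiles = get_tile_value_buckets_alt tiles := by
  unfold get_tile_value_buckets get_tile_value_buckets_alt get_tile_value
  -- rewrite A's fold over tiles as a fold over (key, tile) pairs
  have hfold : tiles.foldl (fun d tile => d.modify (PySem.Int.floordiv tile 10) [] (· ++ [tile])) PySem.Dict.empty
      = (tiles.map (fun tile => (PySem.Int.floordiv tile 10, tile))).foldl
          (fun d p => d.modify p.1 [] (· ++ [p.2])) PySem.Dict.empty := by
    rw [List.foldl_map]
  rw [hfold]
  set d := (tiles.map (fun tile => (PySem.Int.floordiv tile 10, tile))).foldl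
      (fun d p => d.modify p.1 [] (· ++ [p.2])) PySem.Dict.empty with hd
  have hnd : d.keys.Nodup := by
    rw [hd]
    have := PySem.Dict.nodup_keys_foldl_modify_key
      (tiles.map (fun tile => (PySem.Int.floordiv tile 10, tile)))
      (fun p => p.1) [] (fun _ p => (· ++ [p.2])) PySem.Dict.empty
      (by simp)
    simpa using this
  have hkeys : d.keys = PySem.List.dedup (tiles.map (fun tile => PySem.Int.floordiv tile 10)) := by
    rw [hd]
    have := PySem.Dict.keys_foldl_modify_key
      (tiles.map (fun tile => (PySem.Int.floordiv tile 10, tile)))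
      (fun p => p.1) [] (fun _ p => (· ++ [p.2])) PySem.Dict.empty
    simp only [PySem.Dict.keys_empty] at this
    rw [show ((tiles.map (fun tile => (PySem.Int.floordiv tile 10, tile))).foldl
        (fun d p => d.modify p.1 [] (· ++ [p.2])) PySem.Dict.empty)
      = ((tiles.map (fun tile => (PySem.Int.floordiv tile 10, tile))).foldl
        (fun d x => d.modify ((fun p => p.1) x) [] ((fun _ p => (· ++ [p.2])) d x)) PySem.Dict.empty) from rfl]
    rw [this]
    simp [PySem.Set.update_nil_left, PySem.List.dedup_eq_ofList, List.map_map, Function.comp_def]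
  have hgetD : ∀ v : Int, d.getD v [] = tiles.filter (fun tile => PySem.Int.floordiv tile 10 == v) := by
    intro v
    rw [hd]
    rw [PySem.Dict.getD_foldl_modify_append]
    simp [PySem.Dict.getD_empty, List.filter_map, List.map_map, Function.comp_def]
  rw [PySem.Dict.items_eq_map_keys d hnd []]
  rw [hkeys]
  exact List.map_congr_left (fun v _ => by rw [hgetD v])

-- ===== VERDICT (by name: the statement is the Claim_ definition above) =====
theorem get_tile_value_buckets_spec : Claim_equal_get_tile_value_buckets := by
  intro tiles _
  unfold Spec_get_tile_value_buckets
  exact (buckets_eq tiles)
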